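-- pv_equiv track=rewrite | github.com/purpledragon-ca/find_match_steps | step_restructure.py | _find_root_csys
-- ===== SOURCE A (Python) =====
-- def _find_root_csys(entities: dict) -> str:
--     for eid, val in entities.items():
--         if val.startswith("AXIS2_PLACEMENT_3D('TS3D_PRODUCT_CSYS'"):
--             return eid
--     for eid, val in entities.items():
--         if val.startswith('AXIS2_PLACEMENT_3D('):
--             return eid
--     raise ValueError("Cannot find root coordinate system (AXIS2_PLACEMENT_3D).")
-- ===== SOURCE B (Python) =====
-- def _find_root_csys(entities: dict) -> str:
--     first_general = None
--     for eid, val in entities.items():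
--         if val.startswith("AXIS2_PLACEMENT_3D('TS3D_PRODUCT_CSYS'"):
--             return eid
--         if first_general is None and val.startswith('AXIS2_PLACEMENT_3D('):
--             first_general = eid
--     if first_general is not None:
--         return first_general
--     raise ValueError("Cannot find root coordinate system (AXIS2_PLACEMENT_3D).")
-- ===== Notes on version B (the rewrite author's own statement) =====
-- stated objective: simpler
-- what changed: Collapses A's two sequential scans into one pass that returns immediately on the specific prefix and records only the first general-prefix match.
import Mathlib
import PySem

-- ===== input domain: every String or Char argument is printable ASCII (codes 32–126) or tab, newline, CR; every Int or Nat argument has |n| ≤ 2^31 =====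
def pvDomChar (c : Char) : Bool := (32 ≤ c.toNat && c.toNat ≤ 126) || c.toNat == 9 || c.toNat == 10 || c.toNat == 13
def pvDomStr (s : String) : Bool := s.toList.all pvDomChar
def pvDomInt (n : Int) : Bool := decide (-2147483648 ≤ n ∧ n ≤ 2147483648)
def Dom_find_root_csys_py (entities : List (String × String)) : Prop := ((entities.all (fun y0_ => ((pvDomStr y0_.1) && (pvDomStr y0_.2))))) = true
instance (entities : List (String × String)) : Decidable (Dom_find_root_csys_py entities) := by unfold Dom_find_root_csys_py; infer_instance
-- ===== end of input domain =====

-- B replaces A's two sequential scans by one pass keeping the first general match; equivalence of return values (both raise when no prefix matches — excluded by Pre_).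

-- ===== PORT A =====
-- two passes: first the specific prefix, then the general one ("" marks the raise path, excluded by Pre_)
def find_root_csys_py (entities : List (String × String)) : String :=
  match entities.find? (fun p => PySem.Str.startswith p.2 "AXIS2_PLACEMENT_3D('TS3D_PRODUCT_CSYS'") with
  | some p => p.1
  | none =>
    match entities.find? (fun p => PySem.Str.startswith p.2 "AXIS2_PLACEMENT_3D(") with
    | some p => p.1
    | none => ""

-- ===== PORT B =====
-- single pass, carrying the first general-prefix id seen so far ("" marks the raise path, excluded by Pre_)
def find_root_csys_alt_loop (rest : List (String × String)) (firstGeneral : Option String) : String :=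
  match rest with
  | [] => match firstGeneral with
          | some g => g
          | none => ""
  | (eid, val) :: t =>
    if PySem.Str.startswith val "AXIS2_PLACEMENT_3D('TS3D_PRODUCT_CSYS'" then eid
    else if firstGeneral.isNone && PySem.Str.startswith val "AXIS2_PLACEMENT_3D(" then
      find_root_csys_alt_loop t (some eid)
    else find_root_csys_alt_loop t firstGeneral

def find_root_csys_py_alt (entities : List (String × String)) : String :=
  find_root_csys_alt_loop entities none

-- ===== PRECONDITION & SPEC =====
-- Pre_ excludes exactly the inputs with no 'AXIS2_PLACEMENT_3D(' value, on which the Python A (and B) raises ValueError.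
def Pre_find_root_csys_py (entities : List (String × String)) : Prop :=
  (entities.any (fun p => PySem.Str.startswith p.2 "AXIS2_PLACEMENT_3D(")) = true
instance (entities : List (String × String)) : Decidable (Pre_find_root_csys_py entities) := by unfold Pre_find_root_csys_py; infer_instance
def pvWitness_find_root_csys_py : (List (String × String)) := [("#10", "AXIS2_PLACEMENT_3D(#11,#12,#13);")]

def Spec_find_root_csys_py (entities : List (String × String)) (out : String) : Prop := out = find_root_csys_py_alt entities
instance (entities : List (String × String)) (out : String) : Decidable (Spec_find_root_csys_py entities out) := by unfold Spec_find_root_csys_py; infer_instance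

-- ===== CLAIM (what is proved, stated in full; the proofs are below) =====
def Claim_equal_find_root_csys_py : Prop := ∀ (entities : List (String × String)), Dom_find_root_csys_py entities → Pre_find_root_csys_py entities → Spec_find_root_csys_py entities (find_root_csys_py entities)

-- ===== LEMMAS AND PROOFS =====

-- once a general match is recorded, the loop only looks for the specific prefix
theorem alt_loop_some (l : List (String × String)) (g : String) :
    find_root_csys_alt_loop l (some g) =
      (match l.find? (fun p => PySem.Str.startswith p.2 "AXIS2_PLACEMENT_3D('TS3D_PRODUCT_CSYS'") with
       | some p => p.1
       | none => g) := by
  induction l with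
  | nil => rfl
  | cons hd t ih =>
    obtain ⟨eid, val⟩ := hd
    by_cases hs : PySem.Str.startswith val "AXIS2_PLACEMENT_3D('TS3D_PRODUCT_CSYS'" = true
    · simp at hs
      simp [find_root_csys_alt_loop, List.find?, hs]
    · simp at hs
      simp [find_root_csys_alt_loop, List.find?, hs, ih]

-- with no match recorded yet, the loop computes A's two-pass result
theorem alt_loop_none (l : List (String × String)) :
    find_root_csys_alt_loop l none = find_root_csys_py l := by
  induction l with
  | nil => rfl
  | cons hd t ih =>
    obtain ⟨eid, val⟩ := hd
    by_cases hs : PySem.Str.startswith val "AXIS2_PLACEMENT_3D('TS3D_PRODUCT_CSYS'" = true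
    · simp at hs
      simp [find_root_csys_alt_loop, find_root_csys_py, List.find?, hs]
    · by_cases hg : PySem.Str.startswith val "AXIS2_PLACEMENT_3D(" = true
      · simp at hs hg
        simp [find_root_csys_alt_loop, find_root_csys_py, List.find?, hs, hg, alt_loop_some]
      · simp at hs hg
        rw [show find_root_csys_alt_loop ((eid, val) :: t) none = find_root_csys_alt_loop t none from by
              simp [find_root_csys_alt_loop, hs, hg], ih]
        simp [find_root_csys_py, List.find?, hs, hg]

-- ===== VERDICT (by name: the statement is the Claim_ definition above) =====
theorem find_root_csys_py_spec : Claim_equal_find_root_csys_py := by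
  intro entities _ _
  unfold Spec_find_root_csys_py find_root_csys_py_alt
  exact (alt_loop_none entities).symm
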